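-- pv_equiv track=rewrite | github.com/alivcor/delacroix | src/delacroix/knowledge_base.py | extract_period_from_tags
-- ===== SOURCE A (Python) =====
-- from typing import Dict, List, Optional, Set
--
-- def extract_period_from_tags(tags: List[str]) -> Optional[tuple]:
--     """Extract time period from tags (returns start_year, end_year)."""
--     for tag in tags:
--         tag_lower = tag.lower()
--
--         # Check for century patterns
--         for century in range(1400, 2000, 100):
--             century_str = str(century)
--             if century_str[:3] in tag_lower or f"{century_str}s" in tag_lower:
--                 return (century, century + 99)
--
--         # Check for specific decades
--         for decade in range(1400, 2000, 10):
--             if f"{decade}s" in tag_lower: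
--                 return (decade, decade + 9)
--
--     return None
-- ===== SOURCE B (Python) =====
-- def extract_period_from_tags(tags):
--     """Extract time period from tags (returns start_year, end_year)."""
--     for tag in tags:
--         century, decade = _scan_min_years(tag.lower())
--         if century is not None:
--             return (century, century + 99)
--         if decade is not None:
--             return (decade, decade + 9)
--     return None
--
--
-- def _century_at(s):
--     """Century start year if s begins with '1x0' (x in '4'..'9'), else None.
--     ('1x0' covers both of A's century patterns: the 3-char prefix of str(c)
--     and 'c' + 's', since '1x00s' itself contains '1x0'.)"""
--     if len(s) >= 3 and s[0] == '1' and '4' <= s[1] <= '9' and s[2] == '0':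
--         return 1000 + 100 * (ord(s[1]) - 48)
--     return None
--
--
-- def _decade_at(s):
--     """Decade start year if s begins with '1xy0s' (x in '4'..'9', y a digit),
--     else None."""
--     if (len(s) >= 5 and s[0] == '1' and '4' <= s[1] <= '9'
--             and '0' <= s[2] <= '9' and s[3] == '0' and s[4] == 's'):
--         return 1000 + 100 * (ord(s[1]) - 48) + 10 * (ord(s[2]) - 48)
--     return None
--
--
-- def _scan_min_years(s):
--     """One left-to-right scan of s, no pattern table: parse century/decade
--     mentions directly out of the text and keep the smallest of each."""
--     century = None
--     decade = None
--     while s: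
--         c = _century_at(s)
--         if c is not None and (century is None or c < century):
--             century = c
--         d = _decade_at(s)
--         if d is not None and (decade is None or d < decade):
--             decade = d
--         s = s[1:]
--     return century, decade
-- ===== Notes on version B (the rewrite author's own statement) =====
-- stated objective: alternative
-- what changed: Instead of testing 72 generated patterns against each tag, B makes one left-to-right scan of the tag and parses century ('1x0') and decade ('1xy0s') mentions directly out of the text, keeping the minimum of each; the century-before-decade and ascending-year priorities of A's nested loops become two running minima.
import Mathlib
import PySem

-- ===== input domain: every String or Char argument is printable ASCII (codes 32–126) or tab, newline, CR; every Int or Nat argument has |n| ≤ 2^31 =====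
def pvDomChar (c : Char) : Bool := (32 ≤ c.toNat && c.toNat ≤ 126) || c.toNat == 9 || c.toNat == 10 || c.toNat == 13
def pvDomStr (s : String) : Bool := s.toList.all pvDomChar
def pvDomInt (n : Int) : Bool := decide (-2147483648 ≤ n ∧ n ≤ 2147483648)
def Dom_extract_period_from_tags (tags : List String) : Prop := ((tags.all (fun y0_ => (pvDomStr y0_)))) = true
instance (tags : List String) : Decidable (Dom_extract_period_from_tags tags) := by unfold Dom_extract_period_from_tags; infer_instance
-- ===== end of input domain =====

-- B replaces A's 72-pattern membership tests by one left-to-right scan of the tag that parses century/decade mentions out of the text, keeping two running minima (objective: alternative).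


-- ===== PORT A =====
-- inner loop 'for century in range(1400, 2000, 100)' with early return
def aCenturyLoop (tag_lower : String) : Option (Int × Int) :=
  (PySem.List.pyRange 1400 2000 100).findSome? (fun century =>
    let century_str := PySem.Int.toStr century
    if PySem.Str.isIn (String.mk (PySem.List.slice century_str.toList none (some 3))) tag_lower
        || PySem.Str.isIn (century_str ++ "s") tag_lower
    then some (century, century + 99) else none)

-- inner loop 'for decade in range(1400, 2000, 10)' with early return
def aDecadeLoop (tag_lower : String) : Option (Int × Int) :=
  (PySem.List.pyRange 1400 2000 10).findSome? (fun decade =>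
    if PySem.Str.isIn (PySem.Int.toStr decade ++ "s") tag_lower
    then some (decade, decade + 9) else none)

def extract_period_from_tags (tags : List String) : Option (Int × Int) :=
  tags.findSome? (fun tag =>
    let tag_lower := PySem.Str.lower tag
    match aCenturyLoop tag_lower with
    | some p => some p
    | none => aDecadeLoop tag_lower)

-- ===== PORT B =====
-- _century_at: century start year if s begins with '1x0' (x in '4'..'9')
def bCenturyAt (s : List Char) : Option Int :=
  match s with
  | a :: b :: c :: _ =>
      if a = '1' ∧ ('4' ≤ b ∧ b ≤ '9') ∧ c = '0'
      then some (1000 + 100 * ((b.toNat : Int) - 48)) else none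
  | _ => none

-- _decade_at: decade start year if s begins with '1xy0s' (x in '4'..'9', y a digit)
def bDecadeAt (s : List Char) : Option Int :=
  match s with
  | a :: b :: c :: d :: e :: _ =>
      if a = '1' ∧ ('4' ≤ b ∧ b ≤ '9') ∧ ('0' ≤ c ∧ c ≤ '9') ∧ d = '0' ∧ e = 's'
      then some (1000 + 100 * ((b.toNat : Int) - 48) + 10 * ((c.toNat : Int) - 48)) else none
  | _ => none

-- 'v is not None and (best is None or v < best): best = v'
def bTakeMin (best : Option Int) (v : Option Int) : Option Int :=
  match v with
  | none => best
  | some v => match best with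
    | none => some v
    | some b => if v < b then some v else some b

-- the 'while s: … s = s[1:]' loop of _scan_min_years, two running minima
def bScan (century decade : Option Int) : List Char → Option Int × Option Int
  | [] => (century, decade)
  | x :: rest =>
      bScan (bTakeMin century (bCenturyAt (x :: rest))) (bTakeMin decade (bDecadeAt (x :: rest))) rest

def extract_period_from_tags_alt (tags : List String) : Option (Int × Int) :=
  tags.findSome? (fun tag =>
    match bScan none none (PySem.Str.lower tag).toList with
    | (some c, _) => some (c, c + 99)
    | (none, some d) => some (d, d + 9)
    | (none, none) => none)

-- ===== PRECONDITION & SPEC =====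
def Spec_extract_period_from_tags (tags : List String) (out : Option (Int × Int)) : Prop := out = extract_period_from_tags_alt tags
instance (tags : List String) (out : Option (Int × Int)) : Decidable (Spec_extract_period_from_tags tags out) := by unfold Spec_extract_period_from_tags; infer_instance

-- ===== CLAIM (what is proved, stated in full; the proofs are below) =====
def Claim_equal_extract_period_from_tags : Prop := ∀ (tags : List String), Dom_extract_period_from_tags tags → Spec_extract_period_from_tags tags (extract_period_from_tags tags)

-- ===== LEMMAS AND PROOFS =====

-- A's candidate year lists and the canonical character pattern each candidate tests for
def cands100 : List Int := PySem.List.pyRange 1400 2000 100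
def cands10 : List Int := PySem.List.pyRange 1400 2000 10
def cpat (c : Int) : List Char := ['1', Char.ofNat (48 + (c.toNat / 100) % 10), '0']
def dpat (d : Int) : List Char := ['1', Char.ofNat (48 + (d.toNat / 100) % 10), Char.ofNat (48 + (d.toNat / 10) % 10), '0', 's']

-- the list of window values f finds over all suffixes of t
def vals (f : List Char → Option Int) : List Char → List Int
  | [] => []
  | x :: rest => (match f (x :: rest) with | some v => [v] | none => []) ++ vals f rest

theorem toList_mk (l : List Char) : (String.mk l).toList = l :=
  Eq.symm ((fun {_} {_} => String.ofList_eq.mp) rfl)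

theorem char_le_iff (a b : Char) : a ≤ b ↔ a.toNat ≤ b.toNat := by
  rw [Char.le_def]; exact UInt32.le_iff_toNat_le

theorem toNat_ofNat_small (n : Nat) (h : n < 55296) : (Char.ofNat n).toNat = n := by
  unfold Char.ofNat
  rw [dif_pos (Or.inl h)]
  simp [Char.ofNatAux, Char.toNat, UInt32.toNat_ofNatLT]

-- folding bTakeMin over (vals f t) starting from none computes List.min?
theorem foldl_bTakeMin_some (vs : List Int) (a : Int) :
    vs.foldl (fun b v => bTakeMin b (some v)) (some a) = some (vs.foldl min a) := by
  induction vs generalizing a with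
  | nil => rfl
  | cons v vs ih =>
      simp only [List.foldl_cons, bTakeMin]
      rw [show (if v < a then some v else some a) = some (min a v) by split_ifs <;> simp [min_def] <;> omega]
      exact ih (min a v)

theorem foldl_bTakeMin_none (vs : List Int) :
    vs.foldl (fun b v => bTakeMin b (some v)) none = vs.min? := by
  cases vs with
  | nil => rfl
  | cons v vs =>
      simp only [List.foldl_cons, bTakeMin]
      exact foldl_bTakeMin_some vs v

-- the scan loop is two independent min-folds over the window-value lists
theorem scan_eq (s : List Char) (century decade : Option Int) :
    bScan century decade s
      = ((vals bCenturyAt s).foldl (fun b v => bTakeMin b (some v)) century,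
         (vals bDecadeAt s).foldl (fun b v => bTakeMin b (some v)) decade) := by
  induction s generalizing century decade with
  | nil => rfl
  | cons x rest ih =>
      rw [bScan, ih]
      simp only [vals]
      cases hc : bCenturyAt (x :: rest) <;> cases hd : bDecadeAt (x :: rest) <;>
        simp [bTakeMin]

theorem mem_vals (f : List Char → Option Int) (hf : f [] = none) (t : List Char) (v : Int) :
    v ∈ vals f t ↔ ∃ s, s <:+ t ∧ f s = some v := by
  induction t with
  | nil =>
      simp only [vals, List.not_mem_nil, false_iff]
      rintro ⟨s, hs, hv⟩
      rw [List.suffix_nil.mp hs, hf] at hv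
      simp at hv
  | cons x rest ih =>
      simp only [vals, List.mem_append, ih]
      constructor
      · rintro (h | ⟨s, hs, hv⟩)
        · refine ⟨x :: rest, List.suffix_refl _, ?_⟩
          cases hfx : f (x :: rest) <;> simp [hfx] at h
          simp [h]
        · exact ⟨s, hs.trans (List.suffix_cons x rest), hv⟩
      · rintro ⟨s, hs, hv⟩
        rcases List.suffix_cons_iff.mp hs with rfl | hs
        · left; simp [hv]
        · right; exact ⟨s, hs, hv⟩

-- findSome? over an ascending candidate list with a filter is min? of the filtered list
theorem findSome?_congr {α β : Type} (l : List α) (f g : α → Option β)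
    (h : ∀ x ∈ l, f x = g x) : l.findSome? f = l.findSome? g := by
  induction l with
  | nil => rfl
  | cons x l ih =>
      rw [List.findSome?_cons, List.findSome?_cons, h x (List.mem_cons_self),
        ih (fun y hy => h y (List.mem_cons_of_mem x hy))]

theorem findSome?_sorted {β : Type} (cands : List Int) (P : Int → Bool) (g : Int → β)
    (hs : cands.Pairwise (· < ·)) :
    cands.findSome? (fun c => if P c then some (g c) else none)
      = ((cands.filter P).min?).map g := by
  induction cands with
  | nil => rfl
  | cons c cs ih =>
      rw [List.findSome?_cons, List.pairwise_cons] at *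
      by_cases hP : P c
      · simp only [hP, if_pos, List.filter_cons_of_pos hP]
        have hmin : (c :: cs.filter P).min? = some c := by
          rw [List.min?_eq_some_iff_subtype]
          refine ⟨List.mem_cons_self, ?_⟩
          intro b hb
          rcases List.mem_cons.mp hb with rfl | hb
          · exact le_refl _
          · exact le_of_lt (hs.1 b (List.mem_of_mem_filter hb))
        rw [hmin]; rfl
      · rw [if_neg (by simp [hP]), List.filter_cons_of_neg (by simp [hP])]
        exact ih hs.2

theorem min?_ext (l₁ l₂ : List Int) (h : ∀ v, v ∈ l₁ ↔ v ∈ l₂) : l₁.min? = l₂.min? := by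
  cases h1 : l₁.min? with
  | none =>
      rw [List.min?_eq_none_iff] at h1
      subst h1
      symm
      rw [List.min?_eq_none_iff, List.eq_nil_iff_forall_not_mem]
      intro v hv
      exact (List.not_mem_nil) ((h v).mpr hv)
  | some a =>
      rw [List.min?_eq_some_iff_subtype] at h1
      symm
      rw [List.min?_eq_some_iff_subtype]
      exact ⟨(h a).mp h1.1, fun b hb => h1.2 b ((h b).mpr hb)⟩

-- a string containing p ++ q contains p
theorem isIn_of_isIn_append (p q t : List Char) (h : PySem.Chars.isIn (p ++ q) t = true) :
    PySem.Chars.isIn p t = true := by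
  rw [PySem.Chars.isIn_iff_infix] at *
  exact ((List.prefix_append p q).isInfix).trans h

-- A's century condition for each candidate collapses to its canonical 3-char pattern
theorem a_century_rw (tl : String) :
    aCenturyLoop tl
      = cands100.findSome? (fun c =>
          if PySem.Chars.isIn (cpat c) tl.toList then some (c, c + 99) else none) := by
  unfold aCenturyLoop
  apply findSome?_congr
  intro c hc
  have hpat : PySem.List.slice (PySem.Int.toChars c) none (some 3) = cpat c ∧
      PySem.Int.toChars c ++ ['s'] = cpat c ++ ['0', 's'] := by
    revert hc
    show c ∈ cands100 → _
    revert c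
    decide
  have h2 : (PySem.Int.toStr c ++ "s").toList = cpat c ++ ['0', 's'] := by
    rw [String.toList_append, PySem.Int.toList_toStr, show "s".toList = ['s'] from rfl, hpat.2]
  simp only [PySem.Str.isIn, toList_mk, PySem.Int.toList_toStr, hpat.1, h2]
  cases h3 : PySem.Chars.isIn (cpat c) tl.toList with
  | true => simp
  | false =>
      have : PySem.Chars.isIn (cpat c ++ ['0', 's']) tl.toList = false := by
        cases h4 : PySem.Chars.isIn (cpat c ++ ['0', 's']) tl.toList with
        | false => rfl
        | true => rw [isIn_of_isIn_append _ _ _ h4] at h3; exact Bool.noConfusion h3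
      simp [this]

theorem a_decade_rw (tl : String) :
    aDecadeLoop tl
      = cands10.findSome? (fun d =>
          if PySem.Chars.isIn (dpat d) tl.toList then some (d, d + 9) else none) := by
  unfold aDecadeLoop
  apply findSome?_congr
  intro d hd
  have hpat : PySem.Int.toChars d ++ ['s'] = dpat d := by
    revert hd
    show d ∈ cands10 → _
    revert d
    decide
  have h2 : (PySem.Int.toStr d ++ "s").toList = dpat d := by
    rw [String.toList_append, PySem.Int.toList_toStr, show "s".toList = ['s'] from rfl, hpat]
  simp only [PySem.Str.isIn, h2]

-- the century window values found in t are exactly the candidates whose pattern occurs in t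
theorem mem_vals_century (t : List Char) (v : Int) :
    v ∈ vals bCenturyAt t ↔ v ∈ cands100.filter (fun c => PySem.Chars.isIn (cpat c) t) := by
  rw [mem_vals bCenturyAt rfl, List.mem_filter]
  constructor
  · rintro ⟨s, hs, hv⟩
    rcases s with _ | ⟨a, _ | ⟨b, _ | ⟨c, r⟩⟩⟩ <;> simp only [bCenturyAt] at hv <;>
      [skip; skip; skip; skip] <;> try simp at hv
    obtain ⟨⟨rfl, ⟨hb1, hb2⟩, rfl⟩, hv⟩ := hv
    subst hv
    rw [char_le_iff] at hb1 hb2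
    have hB1 : 52 ≤ b.toNat := hb1
    have hB2 : b.toNat ≤ 57 := hb2
    constructor
    · show _ ∈ PySem.List.pyRange 1400 2000 100
      rw [PySem.List.mem_pyRange_iff_of_pos (by norm_num)]
      omega
    · have hcp : cpat (1000 + 100 * ((b.toNat : Int) - 48)) = ['1', b, '0'] := by
        unfold cpat
        have h1 : (1000 + 100 * ((b.toNat : Int) - 48)).toNat / 100 % 10 = b.toNat - 48 := by
          omega
        rw [h1, show 48 + (b.toNat - 48) = b.toNat by omega, Char.ofNat_toNat]
      rw [hcp, PySem.Chars.isIn_iff_infix]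
      exact (List.IsPrefix.isInfix ⟨r, rfl⟩).trans (hs.isInfix)
  · rintro ⟨hmem, hin⟩
    rw [PySem.Chars.isIn_iff_infix, List.infix_iff_prefix_suffix] at hin
    obtain ⟨s, hpre, hsuf⟩ := hin
    have hmem' := (PySem.List.mem_pyRange_iff_of_pos (a := 1400) (b := 2000) (by norm_num) v).mp hmem
    obtain ⟨r, rfl⟩ := hpre
    refine ⟨cpat v ++ r, hsuf, ?_⟩
    have hofn : (Char.ofNat (48 + v.toNat / 100 % 10)).toNat = 48 + v.toNat / 100 % 10 :=
      toNat_ofNat_small _ (by omega)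
    have hcond : '4' ≤ Char.ofNat (48 + v.toNat / 100 % 10) ∧
        Char.ofNat (48 + v.toNat / 100 % 10) ≤ '9' := by
      refine ⟨?_, ?_⟩ <;> rw [char_le_iff, hofn]
      · show 52 ≤ _; omega
      · show _ ≤ 57; omega
    unfold cpat
    simp only [List.cons_append, List.nil_append, bCenturyAt, true_and, and_true]
    rw [if_pos hcond]
    congr 1
    rw [hofn]
    omega

theorem mem_vals_decade (t : List Char) (v : Int) :
    v ∈ vals bDecadeAt t ↔ v ∈ cands10.filter (fun d => PySem.Chars.isIn (dpat d) t) := by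
  rw [mem_vals bDecadeAt rfl, List.mem_filter]
  constructor
  · rintro ⟨s, hs, hv⟩
    rcases s with _ | ⟨a, _ | ⟨b, _ | ⟨c, _ | ⟨d, _ | ⟨e, r⟩⟩⟩⟩⟩ <;> simp only [bDecadeAt] at hv <;>
      [skip; skip; skip; skip; skip; skip] <;> try simp at hv
    obtain ⟨⟨rfl, ⟨hb1, hb2⟩, ⟨hc1, hc2⟩, rfl, rfl⟩, hv⟩ := hv
    subst hv
    rw [char_le_iff] at hb1 hb2 hc1 hc2
    have hB1 : 52 ≤ b.toNat := hb1
    have hB2 : b.toNat ≤ 57 := hb2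
    have hC1 : 48 ≤ c.toNat := hc1
    have hC2 : c.toNat ≤ 57 := hc2
    constructor
    · show _ ∈ PySem.List.pyRange 1400 2000 10
      rw [PySem.List.mem_pyRange_iff_of_pos (by norm_num)]
      omega
    · have hdp : dpat (1000 + 100 * ((b.toNat : Int) - 48) + 10 * ((c.toNat : Int) - 48))
          = ['1', b, c, '0', 's'] := by
        unfold dpat
        have h1 : (1000 + 100 * ((b.toNat : Int) - 48) + 10 * ((c.toNat : Int) - 48)).toNat / 100 % 10
            = b.toNat - 48 := by omega
        have h2 : (1000 + 100 * ((b.toNat : Int) - 48) + 10 * ((c.toNat : Int) - 48)).toNat / 10 % 10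
            = c.toNat - 48 := by omega
        rw [h1, h2, show 48 + (b.toNat - 48) = b.toNat by omega,
          show 48 + (c.toNat - 48) = c.toNat by omega, Char.ofNat_toNat, Char.ofNat_toNat]
      rw [hdp, PySem.Chars.isIn_iff_infix]
      exact (List.IsPrefix.isInfix ⟨r, rfl⟩).trans (hs.isInfix)
  · rintro ⟨hmem, hin⟩
    rw [PySem.Chars.isIn_iff_infix, List.infix_iff_prefix_suffix] at hin
    obtain ⟨s, hpre, hsuf⟩ := hin
    have hmem' := (PySem.List.mem_pyRange_iff_of_pos (a := 1400) (b := 2000) (by norm_num) v).mp hmem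
    obtain ⟨r, rfl⟩ := hpre
    refine ⟨dpat v ++ r, hsuf, ?_⟩
    have hofb : (Char.ofNat (48 + v.toNat / 100 % 10)).toNat = 48 + v.toNat / 100 % 10 :=
      toNat_ofNat_small _ (by omega)
    have hofc : (Char.ofNat (48 + v.toNat / 10 % 10)).toNat = 48 + v.toNat / 10 % 10 :=
      toNat_ofNat_small _ (by omega)
    have hcond : ('4' ≤ Char.ofNat (48 + v.toNat / 100 % 10) ∧
        Char.ofNat (48 + v.toNat / 100 % 10) ≤ '9') ∧
        ('0' ≤ Char.ofNat (48 + v.toNat / 10 % 10) ∧ Char.ofNat (48 + v.toNat / 10 % 10) ≤ '9') := by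
      refine ⟨⟨?_, ?_⟩, ?_, ?_⟩ <;> rw [char_le_iff]
      · rw [hofb]; show 52 ≤ _; omega
      · rw [hofb]; show _ ≤ 57; omega
      · rw [hofc]; show 48 ≤ _; omega
      · rw [hofc]; show _ ≤ 57; omega
    unfold dpat
    simp only [List.cons_append, List.nil_append, bDecadeAt, true_and, and_true]
    rw [if_pos hcond]
    congr 1
    rw [hofb, hofc]
    omega

-- per tag: A's two-loop chain equals B's scan
theorem perTag (tag : String) :
    (match aCenturyLoop (PySem.Str.lower tag) with
     | some p => some p
     | none => aDecadeLoop (PySem.Str.lower tag))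
    = (match bScan none none (PySem.Str.lower tag).toList with
       | (some c, _) => some (c, c + 99)
       | (none, some d) => some (d, d + 9)
       | (none, none) => none) := by
  have t := (PySem.Str.lower tag).toList
  rw [scan_eq, foldl_bTakeMin_none, foldl_bTakeMin_none,
    min?_ext _ _ (mem_vals_century (PySem.Str.lower tag).toList),
    min?_ext _ _ (mem_vals_decade (PySem.Str.lower tag).toList),
    a_century_rw, a_decade_rw,
    findSome?_sorted _ _ _ (by unfold cands100; decide),
    findSome?_sorted _ _ _ (by unfold cands10; decide)]
  cases (cands100.filter (fun c => PySem.Chars.isIn (cpat c) (PySem.Str.lower tag).toList)).min? with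
  | some c => rfl
  | none =>
      cases (cands10.filter (fun d => PySem.Chars.isIn (dpat d) (PySem.Str.lower tag).toList)).min? with
      | some d => rfl
      | none => rfl

-- ===== VERDICT (by name: the statement is the Claim_ definition above) =====
theorem extract_period_from_tags_spec : Claim_equal_extract_period_from_tags := by
  intro tags hd
  unfold Spec_extract_period_from_tags extract_period_from_tags extract_period_from_tags_alt
  clear hd
  induction tags with
  | nil => rfl
  | cons tag tags ih =>
      simp only [List.findSome?_cons]
      rw [perTag tag]
      cases bScan none none (PySem.Str.lower tag).toList with
      | mk c d =>
          cases c with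
          | some c => rfl
          | none => cases d with
            | some d => rfl
            | none => exact ih
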